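-- pv_equiv track=rewrite | github.com/olsisoft/viralify | services/presentation-generator/services/diagram_generator.py | _validate_mermaid_code
-- ===== SOURCE A (Python) =====
-- def _validate_mermaid_code(code: str) -> bool:
--     """Basic validation of Mermaid syntax"""
--     if not code or len(code) < 10:
--         return False
--
--     lines = code.strip().split('\n')
--     # Must have at least diagram type declaration
--     has_diagram_type = False
--     valid_starts = ['flowchart', 'sequenceDiagram', 'classDiagram', 'stateDiagram',
--                    'erDiagram', 'gantt', 'pie', 'mindmap', 'timeline', 'graph', '%%{init']
--
--     for line in lines:
--         line = line.strip()
--         if any(line.startswith(s) for s in valid_starts):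
--             has_diagram_type = True
--             break
--
--     return has_diagram_type
-- ===== SOURCE B (Python) =====
-- def _validate_mermaid_code(code: str) -> bool:
--     """Single-pass scan: at each position still in a line's leading blanks, test for a diagram-type prefix."""
--     if not code or len(code) < 10:
--         return False
--     starts = ('flowchart', 'sequenceDiagram', 'classDiagram', 'stateDiagram',
--               'erDiagram', 'gantt', 'pie', 'mindmap', 'timeline', 'graph', '%%{init')
--     armed = True  # True while only blanks have been seen since the current line's start
--     for i, c in enumerate(code):
--         if armed and code.startswith(starts, i):
--             return True
--         armed = c == '\n' or (armed and c in ' \t\r')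
--     return False
-- ===== Notes on version B (the rewrite author's own statement) =====
-- stated objective: alternative
-- what changed: Replaces A's whole-string strip, split into a line list and per-line strip with a nested any() by a single character-level scan that carries a boolean line-start flag and tests the prefix tuple in place, never materialising the line list.
import Mathlib
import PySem

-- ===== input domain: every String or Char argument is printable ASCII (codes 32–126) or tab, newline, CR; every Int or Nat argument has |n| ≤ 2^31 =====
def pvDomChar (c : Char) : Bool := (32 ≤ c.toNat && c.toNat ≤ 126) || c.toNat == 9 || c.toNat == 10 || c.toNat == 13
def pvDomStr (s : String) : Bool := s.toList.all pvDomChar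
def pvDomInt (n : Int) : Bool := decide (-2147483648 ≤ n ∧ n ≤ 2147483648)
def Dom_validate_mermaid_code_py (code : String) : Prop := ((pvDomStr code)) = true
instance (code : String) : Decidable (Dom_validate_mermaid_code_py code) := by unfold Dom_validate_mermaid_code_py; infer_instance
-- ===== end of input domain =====

-- B replaces A's strip + split('\n') + per-line strip + nested any() with a single character-level
-- scan carrying a line-start flag (alternative decomposition, same asymptotic cost).

-- ===== PORT A =====
def pvValidStarts : List String :=
  ["flowchart", "sequenceDiagram", "classDiagram", "stateDiagram",
   "erDiagram", "gantt", "pie", "mindmap", "timeline", "graph", "%%{init"]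

-- the `for line in lines` loop with its break
def pvALoop : List String → Bool
  | [] => false
  | line :: rest =>
      if pvValidStarts.any (fun s => PySem.Str.startswith (PySem.Str.strip line) s) then true
      else pvALoop rest

def validate_mermaid_code_py (code : String) : Bool :=
  if code == "" || PySem.Str.len code < 10 then false
  else
    match PySem.Str.split? (PySem.Str.strip code) "\n" with
    | some lines => pvALoop lines
    | none => false   -- unreachable: the separator "\n" is nonempty

-- ===== PORT B =====
def pvStarts : List (List Char) :=
  ["flowchart".toList, "sequenceDiagram".toList, "classDiagram".toList, "stateDiagram".toList,
   "erDiagram".toList, "gantt".toList, "pie".toList, "mindmap".toList, "timeline".toList,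
   "graph".toList, "%%{init".toList]

-- Python's `c in ' \t\r'`
def pvBlank (c : Char) : Bool := c == ' ' || c == '\t' || c == '\r'

-- Python's `code.startswith(starts, i)` on the suffix from i
def pvStartsAny (cs : List Char) : Bool := pvStarts.any fun p => PySem.Chars.startswith cs p

-- the enumerate loop of Source B, with its line-start flag
def pvScan : Bool → List Char → Bool
  | _, [] => false
  | armed, c :: rest =>
      if armed && pvStartsAny (c :: rest) then true
      else pvScan (c == '\n' || (armed && pvBlank c)) rest

def validate_mermaid_code_py_alt (code : String) : Bool :=
  if code == "" || PySem.Str.len code < 10 then false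
  else pvScan true code.toList

-- ===== PRECONDITION & SPEC =====
def Spec_validate_mermaid_code_py (code : String) (out : Bool) : Prop := out = validate_mermaid_code_py_alt code
instance (code : String) (out : Bool) : Decidable (Spec_validate_mermaid_code_py code out) := by unfold Spec_validate_mermaid_code_py; infer_instance

-- ===== CLAIM (what is proved, stated in full; the proofs are below) =====
def Claim_equal_validate_mermaid_code_py : Prop := ∀ (code : String), Dom_validate_mermaid_code_py code → Spec_validate_mermaid_code_py code (validate_mermaid_code_py code)

-- ===== LEMMAS AND PROOFS =====

-- `split('\n')` as a plain structural recursion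
def pvLines : List Char → List (List Char)
  | [] => [[]]
  | c :: cs =>
      if c = '\n' then [] :: pvLines cs
      else match pvLines cs with
        | [] => [[c]]
        | h :: t => (c :: h) :: t

def pvConsHead (pre : List Char) : List (List Char) → List (List Char)
  | [] => [pre]
  | h :: t => (pre ++ h) :: t

def pvSnocLast : List (List Char) → Char → List (List Char)
  | [], c => [[c]]
  | [l], c => [l ++ [c]]
  | l :: L, c => l :: pvSnocLast L c

lemma pvLines_ne_nil (cs : List Char) : pvLines cs ≠ [] := by
  cases cs with
  | nil => simp [pvLines]
  | cons c cs =>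
      simp only [pvLines]
      split
      · simp
      · cases h : pvLines cs <;> simp

lemma pvGo_eq (fuel : Nat) : ∀ (l cur : List Char) (acc : List (List Char)), l.length ≤ fuel →
    PySem.Chars.splitOn.go ['\n'] fuel l cur acc = acc.reverse ++ pvConsHead cur.reverse (pvLines l) := by
  induction fuel with
  | zero =>
      intro l cur acc hl
      have : l = [] := by cases l <;> simp_all
      subst this
      simp [PySem.Chars.splitOn.go, pvLines, pvConsHead]
  | succ n ih =>
      intro l cur acc hl
      cases l with
      | nil => simp [PySem.Chars.splitOn.go, pvLines, pvConsHead]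
      | cons c rest =>
          rw [PySem.Chars.splitOn.go]
          by_cases hc : c = '\n'
          · subst hc
            have hpre : List.isPrefixOf ['\n'] ('\n' :: rest) = true := by
              simp [List.isPrefixOf]
            simp only [hpre, if_pos]
            simp only [List.length_cons, List.length_nil, List.drop_succ_cons, List.drop_zero]
            rw [ih rest [] (cur.reverse :: acc) (by simpa using Nat.le_of_succ_le_succ hl)]
            have hne := pvLines_ne_nil rest
            cases hrest : pvLines rest with
            | nil => exact absurd hrest hne
            | cons h t =>
                simp [pvLines, pvConsHead, hrest]
          · have hpre : List.isPrefixOf ['\n'] (c :: rest) = true ↔ False := by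
              simp [List.isPrefixOf]
              intro h; exact absurd h.symm hc
            rw [if_neg (by simp [hpre])]
            rw [ih rest (c :: cur) acc (by simpa using Nat.le_of_succ_le_succ hl)]
            have hne := pvLines_ne_nil rest
            cases hrest : pvLines rest with
            | nil => exact absurd hrest hne
            | cons h t =>
                simp [pvLines, pvConsHead, hrest, hc]

lemma pvSplitOn_nl (cs : List Char) : PySem.Chars.splitOn cs ['\n'] = pvLines cs := by
  unfold PySem.Chars.splitOn
  rw [pvGo_eq (cs.length + 1) cs [] [] (by omega)]
  have hne := pvLines_ne_nil cs
  cases h : pvLines cs with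
  | nil => exact absurd h hne
  | cons a t => simp [pvConsHead]

-- per-line predicate: "the stripped line starts with one of the prefixes", lstrip form
def pvG (l : List Char) : Bool := pvStartsAny (PySem.Chars.lstrip l)

-- facts about the literal prefix list
lemma pvStarts_heads : ∀ p ∈ pvStarts, p ≠ [] ∧ PySem.Chars.isspace (p.headD 'x') = false := by decide
lemma pvStarts_lasts : ∀ p ∈ pvStarts, p ≠ [] ∧ PySem.Chars.isspace (p.getLastD 'x') = false := by decide
lemma pvStarts_no_nl : ∀ p ∈ pvStarts, '\n' ∉ p := by decide

lemma pvIsPrefixOf_cons_space {p : List Char} {c : Char} {xs : List Char}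
    (hne : p ≠ []) (hh : PySem.Chars.isspace (p.headD 'x') = false)
    (hc : PySem.Chars.isspace c = true) : p.isPrefixOf (c :: xs) = false := by
  cases p with
  | nil => exact absurd rfl hne
  | cons a p' =>
      simp only [List.headD] at hh
      have hac : (a == c) = false := by
        cases hEq : a == c
        · rfl
        · exact absurd (eq_of_beq hEq ▸ hc) (by simp [hh])
      simp [List.isPrefixOf, hac]

lemma pvIsPrefixOf_snoc_space {p z : List Char} {c : Char}
    (hl : PySem.Chars.isspace (p.getLastD 'x') = false)
    (hc : PySem.Chars.isspace c = true) : p.isPrefixOf (z ++ [c]) = p.isPrefixOf z := by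
  rw [Bool.eq_iff_iff]
  simp only [List.isPrefixOf_iff_prefix]
  constructor
  · intro h
    rcases List.prefix_concat_iff.mp h with h | h
    · exfalso
      rw [h] at hl
      have hlast : (z ++ [c]).getLastD 'x' = c := by
        rw [List.getLastD_eq_getLast?, List.getLast?_concat]
        rfl
      rw [hlast] at hl
      rw [hc] at hl
      exact Bool.true_eq_false.mp hl
    · exact h
  · intro h
    exact h.trans (List.prefix_append _ _)

lemma pvIsPrefixOf_append_nl {p : List Char} (hp : '\n' ∉ p) :
    ∀ (l r : List Char), p.isPrefixOf (l ++ '\n' :: r) = p.isPrefixOf l := by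
  induction p with
  | nil => intro l r; simp [List.isPrefixOf]
  | cons a p' ih =>
      intro l r
      have ha : a ≠ '\n' := by intro h; exact hp (by simp [h])
      have hp' : '\n' ∉ p' := by intro h; exact hp (by simp [h])
      cases l with
      | nil =>
          have : (a == '\n') = false := by
            cases hEq : a == '\n'
            · rfl
            · exact absurd (eq_of_beq hEq) ha
          simp [List.isPrefixOf, this]
      | cons b l' =>
          simp only [List.cons_append, List.isPrefixOf]
          rw [ih hp' l' r]

lemma pvStartsAny_nil : pvStartsAny [] = false := by decide

lemma pvStartsAny_cons_space {c : Char} {xs : List Char} (hc : PySem.Chars.isspace c = true) :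
    pvStartsAny (c :: xs) = false := by
  simp only [pvStartsAny, PySem.Chars.startswith, List.any_eq_false]
  intro p hp
  simp [pvIsPrefixOf_cons_space (pvStarts_heads p hp).1 (pvStarts_heads p hp).2 hc]

lemma pvStartsAny_congr {xs ys : List Char}
    (h : ∀ p ∈ pvStarts, p.isPrefixOf xs = p.isPrefixOf ys) :
    pvStartsAny xs = pvStartsAny ys := by
  simp only [pvStartsAny, PySem.Chars.startswith]
  rw [Bool.eq_iff_iff]
  simp only [List.any_eq_true]
  constructor
  · rintro ⟨p, hp, hpp⟩
    exact ⟨p, hp, by rw [← h p hp]; exact hpp⟩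
  · rintro ⟨p, hp, hpp⟩
    exact ⟨p, hp, by rw [h p hp]; exact hpp⟩

lemma pvStartsAny_snoc_space {z : List Char} {c : Char} (hc : PySem.Chars.isspace c = true) :
    pvStartsAny (z ++ [c]) = pvStartsAny z :=
  pvStartsAny_congr fun p hp =>
    pvIsPrefixOf_snoc_space (pvStarts_lasts p hp).2 hc

lemma pvStartsAny_append_nl (l r : List Char) : pvStartsAny (l ++ '\n' :: r) = pvStartsAny l :=
  pvStartsAny_congr fun p hp => pvIsPrefixOf_append_nl (pvStarts_no_nl p hp) l r

lemma pvLstrip_cons (c : Char) (cs : List Char) :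
    PySem.Chars.lstrip (c :: cs) =
      if PySem.Chars.isspace c then PySem.Chars.lstrip cs else c :: cs := by
  simp only [PySem.Chars.lstrip, List.dropWhile]
  split <;> simp_all

lemma pvRstrip_snoc (y : List Char) (c : Char) :
    PySem.Chars.rstrip (y ++ [c]) =
      if PySem.Chars.isspace c then PySem.Chars.rstrip y else y ++ [c] := by
  simp only [PySem.Chars.rstrip, List.reverse_append, List.reverse_cons, List.reverse_nil,
    List.nil_append, List.cons_append, List.dropWhile]
  split <;> simp_all

lemma pvStartsAny_rstrip (x : List Char) : pvStartsAny (PySem.Chars.rstrip x) = pvStartsAny x := by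
  induction x using List.reverseRecOn with
  | nil => simp [PySem.Chars.rstrip]
  | append_singleton y c ih =>
      rw [pvRstrip_snoc]
      by_cases hc : PySem.Chars.isspace c
      · rw [if_pos hc, ih, pvStartsAny_snoc_space hc]
      · rw [if_neg hc]

lemma pvG_strip (l : List Char) : pvStartsAny (PySem.Chars.strip l) = pvG l := by
  simp only [PySem.Chars.strip, pvG, pvStartsAny_rstrip]

lemma pvG_nil : pvG [] = false := by decide

lemma pvG_cons_space {c : Char} {l : List Char} (hc : PySem.Chars.isspace c = true) :
    pvG (c :: l) = pvG l := by
  simp [pvG, pvLstrip_cons, hc]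

lemma pvG_snoc_space {c : Char} (hc : PySem.Chars.isspace c = true) (l : List Char) :
    pvG (l ++ [c]) = pvG l := by
  induction l with
  | nil => simp [pvG, PySem.Chars.lstrip, List.dropWhile, hc, pvStartsAny_nil]
  | cons a l' ih =>
      by_cases ha : PySem.Chars.isspace a
      · rw [List.cons_append, pvG_cons_space ha, ih, pvG_cons_space ha]
      · simp only [pvG, List.cons_append, pvLstrip_cons, if_neg ha]
        rw [show a :: (l' ++ [c]) = (a :: l') ++ [c] by simp]
        exact pvStartsAny_snoc_space hc

lemma pvAnyG_lstrip (cs : List Char) :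
    (pvLines (PySem.Chars.lstrip cs)).any pvG = (pvLines cs).any pvG := by
  induction cs with
  | nil => rfl
  | cons c cs ih =>
      rw [pvLstrip_cons]
      by_cases hc : PySem.Chars.isspace c
      · rw [if_pos hc, ih]
        by_cases hnl : c = '\n'
        · subst hnl
          simp [pvLines, pvG_nil]
        · have hne := pvLines_ne_nil cs
          cases h : pvLines cs with
          | nil => exact absurd h hne
          | cons a t =>
              simp [pvLines, hnl, h, pvG_cons_space hc]
      · rw [if_neg hc]

lemma pvLines_snoc (y : List Char) (c : Char) :
    pvLines (y ++ [c]) =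
      if c = '\n' then pvLines y ++ [[]] else pvSnocLast (pvLines y) c := by
  induction y with
  | nil =>
      by_cases hc : c = '\n' <;> simp [pvLines, pvSnocLast, hc]
  | cons a y' ih =>
      by_cases ha : a = '\n'
      · subst ha
        by_cases hc : c = '\n' <;>
          simp_all [pvLines, pvSnocLast, pvLines_ne_nil]
      · by_cases hc : c = '\n'
        · subst hc
          have hne := pvLines_ne_nil y'
          cases h : pvLines y' with
          | nil => exact absurd h hne
          | cons b t =>
              simp [pvLines, ha, h, ih]
        · have hne := pvLines_ne_nil y'
          cases h : pvLines y' with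
          | nil => exact absurd h hne
          | cons b t =>
              cases t with
              | nil => simp [pvLines, ha, hc, h, ih, pvSnocLast]
              | cons b' t' => simp [pvLines, ha, hc, h, ih, pvSnocLast]

lemma pvAnyG_snocLast {c : Char} (hc : PySem.Chars.isspace c = true) (L : List (List Char)) :
    (pvSnocLast L c).any pvG = L.any pvG := by
  induction L with
  | nil => simp [pvSnocLast, pvG, PySem.Chars.lstrip, hc, pvStartsAny_nil, List.dropWhile]
  | cons l L' ih =>
      cases L' with
      | nil => simp [pvSnocLast, pvG_snoc_space hc]
      | cons l' L'' => simp [pvSnocLast, ih]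

lemma pvAnyG_rstrip (x : List Char) :
    (pvLines (PySem.Chars.rstrip x)).any pvG = (pvLines x).any pvG := by
  induction x using List.reverseRecOn with
  | nil => simp [PySem.Chars.rstrip]
  | append_singleton y c ih =>
      rw [pvRstrip_snoc]
      by_cases hc : PySem.Chars.isspace c
      · rw [if_pos hc, ih, pvLines_snoc]
        by_cases hnl : c = '\n'
        · simp [hnl, pvG_nil]
        · rw [if_neg hnl, pvAnyG_snocLast hc]
      · rw [if_neg hc]

-- domain facts about single characters
lemma pvBlank_of_space {c : Char} (hd : pvDomChar c = true)
    (hs : PySem.Chars.isspace c = true) (hne : c ≠ '\n') : pvBlank c = true := by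
  simp only [pvDomChar, Bool.or_eq_true, Bool.and_eq_true, decide_eq_true_eq, beq_iff_eq] at hd
  simp only [PySem.Chars.isspace, Bool.or_eq_true, Bool.and_eq_true, decide_eq_true_eq] at hs
  have h10 : c.toNat ≠ 10 := by
    intro h
    exact hne (by rw [← Char.ofNat_toNat c, h])
  have : c.toNat = 32 ∨ c.toNat = 9 ∨ c.toNat = 13 := by omega
  rcases this with h | h | h <;>
    · rw [← Char.ofNat_toNat c, h]
      decide

lemma pvBlank_of_not_space {c : Char} (hs : PySem.Chars.isspace c = false) : pvBlank c = false := by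
  simp only [pvBlank, Bool.or_eq_false_iff]
  refine ⟨⟨?_, ?_⟩, ?_⟩ <;>
    · cases hEq : c == _
      · rfl
      · exact absurd (eq_of_beq hEq ▸ hs) (by decide)

lemma pvBeq_nl_false {c : Char} (hne : c ≠ '\n') : (c == '\n') = false := by
  cases hEq : c == '\n'
  · rfl
  · exact absurd (eq_of_beq hEq) hne

-- a newline-free, in-domain line: the scan fires exactly on the lstripped line when armed
lemma pvScan_line (l : List Char) (hnl : '\n' ∉ l) (hd : l.all pvDomChar) :
    ∀ armed, pvScan armed l = (armed && pvStartsAny (PySem.Chars.lstrip l)) := by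
  induction l with
  | nil => intro armed; simp [pvScan, PySem.Chars.lstrip, pvStartsAny_nil]
  | cons c l' ih =>
      intro armed
      have hc : c ≠ '\n' := by intro h; exact hnl (by simp [h])
      have hd' : l'.all pvDomChar := by simp_all [List.all_cons]
      have hdc : pvDomChar c = true := by simp_all [List.all_cons]
      have hnl' : '\n' ∉ l' := by intro h; exact hnl (by simp [h])
      by_cases hs : PySem.Chars.isspace c
      · rw [pvScan, if_neg (by simp [pvStartsAny_cons_space hs])]
        rw [pvBeq_nl_false hc, pvBlank_of_space hdc hs hc]
        rw [pvLstrip_cons, if_pos hs]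
        simpa using ih hnl' hd' armed
      · rw [pvScan, pvLstrip_cons, if_neg hs]
        rw [pvBeq_nl_false hc, pvBlank_of_not_space (by simpa using hs)]
        simp only [Bool.false_or, Bool.and_false]
        rw [ih hnl' hd' false]
        cases armed && pvStartsAny (c :: l') <;> simp

lemma pvScan_seg (l : List Char) (hnl : '\n' ∉ l) (hd : l.all pvDomChar) (r : List Char) :
    ∀ armed, pvScan armed (l ++ '\n' :: r) =
      ((armed && pvStartsAny (PySem.Chars.lstrip l)) || pvScan true r) := by
  induction l with
  | nil =>
      intro armed
      rw [List.nil_append, pvScan,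
        if_neg (by simp [pvStartsAny_cons_space (show PySem.Chars.isspace '\n' = true by decide)])]
      simp [PySem.Chars.lstrip, pvStartsAny_nil]
  | cons c l' ih =>
      intro armed
      have hc : c ≠ '\n' := by intro h; exact hnl (by simp [h])
      have hd' : l'.all pvDomChar := by simp_all [List.all_cons]
      have hdc : pvDomChar c = true := by simp_all [List.all_cons]
      have hnl' : '\n' ∉ l' := by intro h; exact hnl (by simp [h])
      rw [List.cons_append, pvScan]
      by_cases hs : PySem.Chars.isspace c
      · rw [if_neg (by simp [pvStartsAny_cons_space hs])]
        rw [pvBeq_nl_false hc, pvBlank_of_space hdc hs hc]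
        rw [pvLstrip_cons, if_pos hs]
        simpa using ih hnl' hd' armed
      · rw [pvBeq_nl_false hc, pvBlank_of_not_space (by simpa using hs)]
        simp only [Bool.false_or, Bool.and_false]
        rw [ih hnl' hd' false]
        simp only [Bool.false_and, Bool.false_or]
        rw [pvLstrip_cons, if_neg hs]
        have : pvStartsAny (c :: (l' ++ '\n' :: r)) = pvStartsAny (c :: l') := by
          rw [show c :: (l' ++ '\n' :: r) = (c :: l') ++ '\n' :: r by simp]
          exact pvStartsAny_append_nl (c :: l') r
        rw [this]
        cases armed && pvStartsAny (c :: l') <;> simp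

lemma pvLines_no_nl {cs : List Char} (h : '\n' ∉ cs) : pvLines cs = [cs] := by
  induction cs with
  | nil => rfl
  | cons c cs ih =>
      have hc : c ≠ '\n' := by intro hh; exact h (by simp [hh])
      have h' : '\n' ∉ cs := by intro hh; exact h (by simp [hh])
      simp [pvLines, hc, ih h']

lemma pvLines_append_nl {l : List Char} (h : '\n' ∉ l) (r : List Char) :
    pvLines (l ++ '\n' :: r) = l :: pvLines r := by
  induction l with
  | nil => simp [pvLines]
  | cons c l' ih =>
      have hc : c ≠ '\n' := by intro hh; exact h (by simp [hh])
      have h' : '\n' ∉ l' := by intro hh; exact h (by simp [hh])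
      rw [List.cons_append, pvLines]
      rw [if_neg hc, ih h']

lemma pvScan_eq_lines (n : Nat) : ∀ cs : List Char, cs.length ≤ n → cs.all pvDomChar →
    pvScan true cs = (pvLines cs).any pvG := by
  induction n with
  | zero =>
      intro cs hl _
      have : cs = [] := by cases cs <;> simp_all
      subst this
      simp [pvScan, pvLines, pvG_nil]
  | succ n ih =>
      intro cs hl hd
      obtain ⟨l, d, hld, hldrop, hcs⟩ :
          ∃ l d, l = cs.takeWhile (· != '\n') ∧ d = cs.dropWhile (· != '\n') ∧ cs = l ++ d :=
        ⟨_, _, rfl, rfl, (List.takeWhile_append_dropWhile).symm⟩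
      have hnl : '\n' ∉ l := by
        intro h
        have := List.mem_takeWhile_imp (hld ▸ h)
        simp at this
      cases d with
      | nil =>
          rw [List.append_nil] at hcs
          rw [hcs] at hd ⊢
          rw [pvScan_line l hnl hd true, pvLines_no_nl hnl]
          simp [pvG]
      | cons c rest =>
          have hcnl : c = '\n' := by
            have hne : cs.dropWhile (· != '\n') ≠ [] := by rw [← hldrop]; simp
            have hhead := List.head_dropWhile_not (· != '\n') hne
            have h3 : (cs.dropWhile (· != '\n')).head? = some c := by rw [← hldrop]; rfl
            rw [List.head?_eq_some_head hne] at h3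
            rw [Option.some.injEq] at h3
            rw [h3] at hhead
            simpa using hhead
          subst hcnl
          subst hcs
          have hdall : l.all pvDomChar ∧ rest.all pvDomChar := by
            simp only [List.all_append, List.all_cons, Bool.and_eq_true] at hd
            exact ⟨hd.1, hd.2.2⟩
          have hlen : rest.length ≤ n := by
            have : (l ++ '\n' :: rest).length = l.length + 1 + rest.length := by
              simp; omega
            omega
          rw [pvScan_seg l hnl hdall.1 rest true, pvLines_append_nl hnl rest]
          rw [ih rest hlen hdall.2]
          simp [pvG]

lemma pvALoop_any (ls : List String) :
    pvALoop ls = ls.any (fun line => pvValidStarts.any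
      (fun s => PySem.Str.startswith (PySem.Str.strip line) s)) := by
  induction ls with
  | nil => rfl
  | cons l rest ih =>
      rw [pvALoop, List.any_cons]
      split
      · simp_all
      · simp_all

lemma pvStrLine_eq (l : List Char) :
    pvValidStarts.any (fun s => PySem.Str.startswith (PySem.Str.strip (String.ofList l)) s) =
      pvStartsAny (PySem.Chars.strip l) := by
  simp [pvValidStarts, pvStartsAny, pvStarts, PySem.Chars.startswith]

-- ===== VERDICT (by name: the statement is the Claim_ definition above) =====
theorem validate_mermaid_code_py_spec : Claim_equal_validate_mermaid_code_py := by
  intro code hdom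
  unfold Spec_validate_mermaid_code_py
  unfold validate_mermaid_code_py validate_mermaid_code_py_alt
  cases hguard : (code == "" || PySem.Str.len code < 10 : Bool)
  · simp only [Bool.false_eq_true, if_false]
    have hsplit : PySem.Str.split? (PySem.Str.strip code) "\n" =
        some ((PySem.Chars.splitOn (PySem.Chars.strip code.toList) ['\n']).map String.ofList) := by
      simp [PySem.Str.split?, PySem.Chars.split?]
    simp only [hsplit]
    rw [pvALoop_any, List.any_map]
    rw [pvSplitOn_nl]
    have hstep : ∀ l : List Char,
        ((fun line => pvValidStarts.any fun s => PySem.Str.startswith (PySem.Str.strip line) s) ∘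
          String.ofList) l = pvG l := by
      intro l
      simp only [Function.comp]
      rw [pvStrLine_eq, pvG_strip]
    rw [List.any_congr rfl hstep]
    have hdom' : code.toList.all pvDomChar = true := hdom
    rw [show PySem.Chars.strip code.toList =
          PySem.Chars.rstrip (PySem.Chars.lstrip code.toList) from rfl]
    rw [pvAnyG_rstrip, pvAnyG_lstrip]
    rw [← pvScan_eq_lines code.toList.length code.toList le_rfl hdom']
  · simp
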